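-- pv_equiv track=rewrite | github.com/hoangthuytruc/Orange | 03_Backtracking/02_HammingDistanceProblem.py | generateSmallestBitString
-- ===== SOURCE A (Python) =====
-- def generateSmallestBitString(n, h):
--     s = ''
--     for i in range(n-1, -1, -1):
--         if i < h:
--             s += '1'
--         else:
--             s += '0'
--     return s
-- ===== SOURCE B (Python) =====
-- def generateSmallestBitString(n, h):
--     ones = max(0, min(n, h))
--     return '0' * (n - ones) + '1' * ones
-- ===== Notes on version B (the rewrite author's own statement) =====
-- stated objective: simpler
-- what changed: Replaces the per-index countdown loop with a closed-form construction: clamp the number of trailing ones to [0, n] and build the string by repetition.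
import Mathlib
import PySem

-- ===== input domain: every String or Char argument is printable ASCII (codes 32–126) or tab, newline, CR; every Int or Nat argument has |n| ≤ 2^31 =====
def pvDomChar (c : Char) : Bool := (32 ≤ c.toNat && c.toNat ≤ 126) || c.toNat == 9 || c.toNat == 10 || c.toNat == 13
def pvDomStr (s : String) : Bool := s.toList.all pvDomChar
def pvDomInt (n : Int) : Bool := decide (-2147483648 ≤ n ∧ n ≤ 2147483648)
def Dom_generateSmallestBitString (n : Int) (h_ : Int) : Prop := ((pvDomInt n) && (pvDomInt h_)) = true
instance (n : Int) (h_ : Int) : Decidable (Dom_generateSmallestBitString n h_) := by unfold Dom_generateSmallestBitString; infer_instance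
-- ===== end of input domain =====

-- B replaces A's per-index countdown loop by a closed-form repetition with the ones-count clamped to [0, n] (objective: simpler).

-- ===== PORT A =====
-- A's loop: for i in range(n-1, -1, -1): s += '1' if i < h else '0'  (string built as List Char)
def generateSmallestBitString (n : Int) (h_ : Int) : String :=
  String.ofList ((PySem.List.pyRange (n - 1) (-1) (-1)).foldl
    (fun s i => if i < h_ then s ++ ['1'] else s ++ ['0']) [])

-- ===== PORT B =====
-- ones = max(0, min(n, h)); '0' * (n - ones) + '1' * ones
def generateSmallestBitString_alt (n : Int) (h_ : Int) : String :=
  let ones : Int := max 0 (min n h_)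
  String.ofList (List.replicate (n - ones).toNat '0' ++ List.replicate ones.toNat '1')

-- ===== PRECONDITION & SPEC =====
def Spec_generateSmallestBitString (n : Int) (h_ : Int) (out : String) : Prop := out = generateSmallestBitString_alt n h_
instance (n : Int) (h_ : Int) (out : String) : Decidable (Spec_generateSmallestBitString n h_ out) := by unfold Spec_generateSmallestBitString; infer_instance

-- ===== CLAIM (what is proved, stated in full; the proofs are below) =====
def Claim_equal_generateSmallestBitString : Prop := ∀ (n : Int) (h_ : Int), Dom_generateSmallestBitString n h_ → Spec_generateSmallestBitString n h_ (generateSmallestBitString n h_)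

-- ===== LEMMAS AND PROOFS =====

-- a 0/1 map over range N splits into a zeros prefix and a ones suffix
theorem map_range_if_lt (N : Nat) (c : Int) :
    (List.range N).map (fun (k : Nat) => if (k : Int) < c then '0' else '1')
      = List.replicate (min N c.toNat) '0' ++ List.replicate (N - min N c.toNat) '1' := by
  induction N with
  | zero => simp
  | succ N ih =>
    rw [List.range_succ, List.map_append, ih]
    by_cases hc : (N : Int) < c
    · have h1 : min N c.toNat = N := by omega
      have h2 : min (N + 1) c.toNat = N + 1 := by omega
      simp [hc, h1, List.replicate_succ' (n := N)]
    · have h1 : min (N + 1) c.toNat = min N c.toNat := by omega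
      have h2 : N + 1 - min N c.toNat = (N - min N c.toNat) + 1 := by omega
      simp [hc, h1, h2, List.replicate_succ' (n := N - min N c.toNat), List.append_assoc]

theorem generateSmallestBitString_eq_alt (n h_ : Int) :
    generateSmallestBitString n h_ = generateSmallestBitString_alt n h_ := by
  unfold generateSmallestBitString generateSmallestBitString_alt
  rw [PySem.List.pyRange_neg_one]
  have hfold : ∀ (l : List Int) (acc : List Char),
      l.foldl (fun s i => if i < h_ then s ++ ['1'] else s ++ ['0']) acc
        = acc ++ l.map (fun i => if i < h_ then '1' else '0') := by
    intro l
    induction l with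
    | nil => intro acc; simp
    | cons x xs ih =>
      intro acc
      by_cases hx : x < h_ <;> simp [hx, ih, List.append_assoc]
  rw [hfold]
  simp only [List.nil_append, List.map_map]
  have hmap : (List.range (n - 1 - -1).toNat).map
        ((fun i => if i < h_ then '1' else '0') ∘ fun (k : Nat) => n - 1 - (k : Int))
      = (List.range (n - 1 - -1).toNat).map (fun (k : Nat) => if (k : Int) < n - h_ then '0' else '1') := by
    apply List.map_congr_left
    intro k _
    simp only [Function.comp]
    by_cases hk : (k : Int) < n - h_
    · rw [if_pos hk, if_neg (by omega)]
    · rw [if_neg hk, if_pos (by omega)]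
  rw [hmap, map_range_if_lt]
  have h1 : min (n - 1 - -1).toNat (n - h_).toNat = (n - max 0 (min n h_)).toNat := by omega
  have h2 : (n - 1 - -1).toNat - (n - max 0 (min n h_)).toNat = (max 0 (min n h_)).toNat := by omega
  rw [h1, h2]

-- ===== VERDICT (by name: the statement is the Claim_ definition above) =====
theorem generateSmallestBitString_spec : Claim_equal_generateSmallestBitString := by
  intro n h_ _
  exact generateSmallestBitString_eq_alt n h_
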